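-- pv_equiv track=rewrite | github.com/dcharb78/UFRFv3_LEAN4_v1 | j_qexp_from_delta_e4_protocol.py | series_pow
-- ===== SOURCE A (Python) =====
-- from typing import List
--
-- def series_mul(a: List[int], b: List[int], deg: int) -> List[int]:
--     """Multiply power series a*b mod q^(deg+1). a[i]=coeff q^i."""
--     out = [0] * (deg + 1)
--     for i, ai in enumerate(a):
--         if ai == 0:
--             continue
--         if i > deg:
--             break
--         jmax = deg - i
--         for j in range(0, min(len(b) - 1, jmax) + 1):
--             bj = b[j]
--             if bj:
--                 out[i + j] += ai * bj
--     return out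
--
-- def series_pow(a: List[int], exp: int, deg: int) -> List[int]:
--     """Power a^exp mod q^(deg+1). exp >= 0."""
--     assert exp >= 0
--     # fast pow, but deg is tiny; keep it simple.
--     out = [0] * (deg + 1)
--     out[0] = 1
--     base = a[:]
--     e = exp
--     while e > 0:
--         if e & 1:
--             out = series_mul(out, base, deg)
--         e >>= 1
--         if e:
--             base = series_mul(base, base, deg)
--     return out
-- ===== SOURCE B (Python) =====
-- from typing import List
--
-- def series_pow(a: List[int], exp: int, deg: int) -> List[int]:
--     """Power a^exp mod q^(deg+1). exp >= 0.
--     Linear exponentiation with a coefficient-wise (gather) convolution."""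
--     assert exp >= 0
--
--     def conv(p: List[int], q: List[int]) -> List[int]:
--         return [sum(p[i] * q[k - i]
--                     for i in range(max(0, k - len(q) + 1),
--                                    min(k, len(p) - 1) + 1))
--                 for k in range(deg + 1)]
--
--     out = [1] + [0] * deg
--     for _ in range(exp):
--         out = conv(out, a)
--     return out
-- ===== Notes on version B (the rewrite author's own statement) =====
-- stated objective: simpler
-- what changed: A's binary exponentiation with a scatter-accumulate series multiply is replaced by linear exponentiation (multiply by a, exp times) using a coefficient-wise gather convolution built per output coefficient; no squaring, no in-place accumulation.
import Mathlib
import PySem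

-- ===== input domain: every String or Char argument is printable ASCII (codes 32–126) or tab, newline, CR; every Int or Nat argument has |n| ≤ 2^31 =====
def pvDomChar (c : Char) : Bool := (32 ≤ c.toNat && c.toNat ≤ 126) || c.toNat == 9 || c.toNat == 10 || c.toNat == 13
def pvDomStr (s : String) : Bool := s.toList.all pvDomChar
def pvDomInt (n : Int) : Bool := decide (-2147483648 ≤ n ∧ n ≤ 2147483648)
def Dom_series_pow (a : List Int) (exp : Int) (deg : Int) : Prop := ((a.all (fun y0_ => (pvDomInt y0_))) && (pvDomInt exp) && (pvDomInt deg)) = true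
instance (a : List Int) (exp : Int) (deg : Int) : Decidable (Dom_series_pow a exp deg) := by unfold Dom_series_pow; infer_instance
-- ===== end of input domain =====

-- B replaces A's binary exponentiation + scatter-accumulate multiply by linear
-- exponentiation with a coefficient-wise gather convolution; simpler, same exact result.

-- ===== PORT A =====
-- A's helper series_mul, inner loop:
-- `for j in range(0, min(len(b)-1, jmax)+1): ... out[i+j] += ai*bj`
def pvInner (ai : Int) (b : List Int) (i : Nat) (m : Nat) (out : List Int) : List Int :=
  (List.range m).foldl
    (fun out j =>
      let bj := b.getD j 0
      if bj ≠ 0 then out.set (i + j) (out.getD (i + j) 0 + ai * bj) else out)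
    out

-- outer loop over `enumerate(a)` with `continue` / `break`
def pvMulLoop (b : List Int) (deg : Int) : List Int → Nat → List Int → List Int
  | [], _, out => out
  | ai :: rest, i, out =>
    if ai = 0 then pvMulLoop b deg rest (i + 1) out
    else if (i : Int) > deg then out
    else pvMulLoop b deg rest (i + 1)
      (pvInner ai b i (min ((b.length : Int) - 1) (deg - (i : Int)) + 1).toNat out)

def series_mul (a b : List Int) (deg : Int) : List Int :=
  pvMulLoop b deg a 0 (List.replicate (deg + 1).toNat 0)

-- A's while loop: `while e > 0: if e & 1: out = mul(out, base); e >>= 1; if e: base = mul(base, base)`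
def pvPowLoop (deg : Int) (e : Nat) (out base : List Int) : List Int :=
  if h : e = 0 then out
  else
    pvPowLoop deg (e / 2)
      (if e % 2 = 1 then series_mul out base deg else out)
      (if e / 2 ≠ 0 then series_mul base base deg else base)
termination_by e
decreasing_by exact Nat.div_lt_self (Nat.pos_of_ne_zero h) one_lt_two

def series_pow (a : List Int) (exp : Int) (deg : Int) : List Int :=
  pvPowLoop deg exp.toNat ((List.replicate (deg + 1).toNat 0).set 0 1) a

-- ===== PORT B =====
-- Source B's conv, k-th coefficient:
-- `sum(p[i]*q[k-i] for i in range(max(0, k-len(q)+1), min(k, len(p)-1)+1))`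
-- (the range bounds keep both indices in range, so getD is exact here)
def pvConvCoeff (p q : List Int) (k : Nat) : Int :=
  (PySem.List.pyRange (max 0 ((k : Int) - q.length + 1))
      (min (k : Int) ((p.length : Int) - 1) + 1) 1).foldl
    (fun s i => s + p.getD i.toNat 0 * q.getD (k - i.toNat) 0) 0

-- Source B's conv: `[<coeff k> for k in range(deg+1)]`
def pvConv (p q : List Int) (deg : Int) : List Int :=
  (List.range (deg + 1).toNat).map (fun k => pvConvCoeff p q k)

-- Source B: out = [1] + [0]*deg; `for _ in range(exp): out = conv(out, a)`
def series_pow_alt (a : List Int) (exp : Int) (deg : Int) : List Int :=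
  (List.range exp.toNat).foldl (fun out _ => pvConv out a deg)
    (1 :: List.replicate deg.toNat 0)

-- ===== PRECONDITION & SPEC =====
-- Pre_ excludes exactly the inputs where Python A raises: exp < 0 (AssertionError) and deg < 0 (IndexError on out[0] = 1).
def Pre_series_pow (a : List Int) (exp : Int) (deg : Int) : Prop := 0 ≤ exp ∧ 0 ≤ deg
instance (a : List Int) (exp : Int) (deg : Int) : Decidable (Pre_series_pow a exp deg) := by unfold Pre_series_pow; infer_instance
def pvWitness_series_pow : List Int × Int × Int := ([1, 2, 3], 3, 4)

def Spec_series_pow (a : List Int) (exp : Int) (deg : Int) (out : List Int) : Prop := out = series_pow_alt a exp deg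
instance (a : List Int) (exp : Int) (deg : Int) (out : List Int) : Decidable (Spec_series_pow a exp deg out) := by unfold Spec_series_pow; infer_instance

-- ===== CLAIM (what is proved, stated in full; the proofs are below) =====
def Claim_equal_series_pow : Prop := ∀ (a : List Int) (exp : Int) (deg : Int), Dom_series_pow a exp deg → Pre_series_pow a exp deg → Spec_series_pow a exp deg (series_pow a exp deg)

-- ===== LEMMAS AND PROOFS =====

-- Polynomial attached to a coefficient list
noncomputable def pvP (a : List Int) : Polynomial Int :=
  ∑ i ∈ Finset.range a.length, Polynomial.C (a.getD i 0) * Polynomial.X ^ i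

theorem pvP_coeff (a : List Int) (n : Nat) : (pvP a).coeff n = a.getD n 0 := by
  unfold pvP
  rw [Polynomial.finset_sum_coeff]
  simp only [Polynomial.coeff_C_mul, Polynomial.coeff_X_pow, mul_ite, mul_one, mul_zero]
  rw [Finset.sum_ite_eq (Finset.range a.length) n (fun i => a.getD i 0)]
  by_cases h : n < a.length
  · simp [h]
  · simp [h]

theorem pv_coeff_mul (p q : Polynomial Int) (k : Nat) :
    (p * q).coeff k = ∑ i ∈ Finset.range (k + 1), p.coeff i * q.coeff (k - i) := by
  rw [Polynomial.coeff_mul, Finset.Nat.sum_antidiagonal_eq_sum_range_succ_mk]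

theorem pvGetD_set (l : List Int) (i j : Nat) (v d : Int) :
    (l.set i v).getD j d = if i = j ∧ i < l.length then v else l.getD j d := by
  rcases Nat.lt_or_ge j l.length with h | h
  · rw [List.getD_eq_getElem _ _ (by simpa), List.getD_eq_getElem _ _ h, List.getElem_set]
    split_ifs with h1 h2 h3 <;> simp_all
  · rw [List.getD_eq_default _ _ (by simpa), List.getD_eq_default _ _ h]
    split_ifs with h1
    · omega
    · rfl

theorem pvInner_length (ai : Int) (b : List Int) (i m : Nat) (out : List Int) :
    (pvInner ai b i m out).length = out.length := by
  unfold pvInner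
  induction (List.range m) generalizing out with
  | nil => rfl
  | cons j l ih =>
      rw [List.foldl_cons, ih]
      dsimp only
      split_ifs <;> simp

theorem pvInner_getD (ai : Int) (b : List Int) (i m : Nat) (out : List Int)
    (hm : i + m ≤ out.length) (k : Nat) (hk : k < out.length) :
    (pvInner ai b i m out).getD k 0 =
      out.getD k 0 + (if i ≤ k ∧ k - i < m then ai * b.getD (k - i) 0 else 0) := by
  induction m with
  | zero =>
      have h : ¬(i ≤ k ∧ k - i < 0) := by omega
      simp [pvInner]
  | succ m ih =>
      have hm' : i + m ≤ out.length := by omega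
      have hP : (pvInner ai b i m out).length = out.length := pvInner_length ..
      have hstep : pvInner ai b i (m+1) out =
          (if b.getD m 0 ≠ 0 then
            (pvInner ai b i m out).set (i+m)
              ((pvInner ai b i m out).getD (i+m) 0 + ai * b.getD m 0)
          else pvInner ai b i m out) := by
        simp [pvInner, List.range_succ]
      rw [hstep]
      by_cases hbj : b.getD m 0 = 0
      · rw [if_neg (by simpa using hbj), ih hm']
        congr 1
        split_ifs <;>
          first | rfl | (exfalso; omega) |
            (rw [show k - i = m from by omega, hbj]; ring)
      · rw [if_pos hbj, pvGetD_set]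
        by_cases he : i + m = k
        · subst he
          rw [if_pos ⟨rfl, by rw [pvInner_length]; omega⟩, ih hm',
            show i + m - i = m from by omega]
          split_ifs <;> first | (exfalso; omega) | ring
        · rw [if_neg (by intro h; exact he h.1), ih hm']
          congr 1
          split_ifs <;> first | rfl | (exfalso; omega)

theorem pvMulLoop_length (b : List Int) (deg : Int) (rest : List Int) (i : Nat) (out : List Int) :
    (pvMulLoop b deg rest i out).length = out.length := by
  induction rest generalizing i out with
  | nil => rfl
  | cons ai rest ih =>
      simp only [pvMulLoop]
      split_ifs <;> first | rfl | (rw [ih, pvInner_length]) | rw [ih]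

theorem pvMulLoop_getD (b : List Int) (deg : Int) (rest : List Int) (i : Nat) (out : List Int)
    (hlen : out.length = (deg + 1).toNat) (k : Nat) (hk : k < out.length) :
    (pvMulLoop b deg rest i out).getD k 0 =
      out.getD k 0 + ∑ t ∈ Finset.range rest.length,
        (if i + t ≤ k then rest.getD t 0 * b.getD (k - (i + t)) 0 else 0) := by
  induction rest generalizing i out with
  | nil => simp [pvMulLoop]
  | cons ai rest ih =>
      simp only [pvMulLoop, List.length_cons]
      split_ifs with h0 hbr
      · rw [ih (i+1) out hlen hk, Finset.sum_range_succ']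
        simp only [List.getD_cons_succ, List.getD_cons_zero, h0, zero_mul, ite_self, add_zero]
        congr 1
        exact Finset.sum_congr rfl (fun t _ => by rw [show i+1+t = i+(t+1) from by omega])
      · have hz : ∀ t ∈ Finset.range (rest.length + 1),
            (if i + t ≤ k then (ai :: rest).getD t 0 * b.getD (k - (i + t)) 0 else 0) = 0 := by
          intro t _
          rw [hlen] at hk
          rw [if_neg (by omega)]
        rw [Finset.sum_eq_zero hz, add_zero]
      · have hkd : (k : Int) ≤ deg := by rw [hlen] at hk; omega
        have him : i + (min ((b.length : Int) - 1) (deg - (i : Int)) + 1).toNat ≤ out.length := by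
          rw [hlen]; omega
        rw [ih (i+1) _ (by rw [pvInner_length]; exact hlen) (by rw [pvInner_length]; exact hk),
          pvInner_getD ai b i _ out him k hk, Finset.sum_range_succ']
        simp only [List.getD_cons_succ, List.getD_cons_zero, Nat.add_zero]
        have hequal : (if i ≤ k ∧ k - i < (min ((b.length : Int) - 1) (deg - (i : Int)) + 1).toNat
              then ai * b.getD (k - i) 0 else 0) =
            (if i ≤ k then ai * b.getD (k - i) 0 else 0) := by
          split_ifs with h1 h2 <;>
            first
              | rfl
              | (exfalso; omega)
              | (rw [List.getD_eq_default _ _ (show b.length ≤ k - i by omega)]; ring)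
        rw [hequal]
        have hsum : (∑ t ∈ Finset.range rest.length,
              if i+1+t ≤ k then rest.getD t 0 * b.getD (k - (i+1+t)) 0 else 0) =
            ∑ t ∈ Finset.range rest.length,
              if i+(t+1) ≤ k then rest.getD t 0 * b.getD (k - (i+(t+1))) 0 else 0 :=
          Finset.sum_congr rfl (fun t _ => by rw [show i+1+t = i+(t+1) from by omega])
        rw [hsum]
        ring

theorem series_mul_char (a b : List Int) (deg : Int) :
    series_mul a b deg = (List.range (deg + 1).toNat).map (fun k => (pvP a * pvP b).coeff k) := by
  apply List.ext_getElem
  · rw [series_mul, pvMulLoop_length, List.length_replicate, List.length_map, List.length_range]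
  · intro k h1 h2
    have hN : (series_mul a b deg).length = (deg + 1).toNat := by
      rw [series_mul, pvMulLoop_length, List.length_replicate]
    have hk : k < (deg + 1).toNat := by omega
    rw [← List.getD_eq_getElem _ 0 h1, ← List.getD_eq_getElem _ 0 h2,
      List.getD_eq_getElem _ 0 h2, List.getElem_map, List.getElem_range]
    have hrep : ∀ j : Nat, (List.replicate (deg + 1).toNat (0 : Int)).getD j 0 = 0 := by
      intro j
      rcases Nat.lt_or_ge j (deg + 1).toNat with h | h
      · rw [List.getD_eq_getElem _ _ (by simpa using h), List.getElem_replicate]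
      · rw [List.getD_eq_default _ _ (by simpa using h)]
    rw [series_mul, pvMulLoop_getD b deg a 0 _ (List.length_replicate ..)
        k (by rw [List.length_replicate]; exact hk), hrep, zero_add]
    rw [pv_coeff_mul]
    simp only [Nat.zero_add, pvP_coeff]
    have hS1 : (∑ t ∈ Finset.range a.length,
          if t ≤ k then a.getD t 0 * b.getD (k - t) 0 else 0) =
        ∑ t ∈ Finset.range (max a.length (k + 1)),
          if t ≤ k then a.getD t 0 * b.getD (k - t) 0 else 0 := by
      apply Finset.sum_subset (fun x hx => by rw [Finset.mem_range] at hx ⊢; omega)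
      intro t _ ht
      rw [Finset.mem_range, Nat.not_lt] at ht
      split_ifs
      · rw [List.getD_eq_default _ _ ht, zero_mul]
      · rfl
    have hS2 : (∑ i ∈ Finset.range (k + 1), a.getD i 0 * b.getD (k - i) 0) =
        ∑ t ∈ Finset.range (max a.length (k + 1)),
          if t ≤ k then a.getD t 0 * b.getD (k - t) 0 else 0 := by
      rw [← Finset.sum_subset
          (show Finset.range (k + 1) ⊆ Finset.range (max a.length (k + 1)) from
            fun x hx => by rw [Finset.mem_range] at hx ⊢; omega)
          (fun t _ ht => by
            rw [Finset.mem_range, Nat.not_lt] at ht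
            rw [if_neg (by omega)])]
      exact Finset.sum_congr rfl (fun t ht => by
        rw [Finset.mem_range] at ht
        rw [if_pos (by omega)])
    rw [hS1, hS2]

-- B's foldl accumulation as a Finset sum
theorem pv_foldl_add (n : Nat) (f : Nat → Int) (init : Int) :
    (List.range n).foldl (fun s i => s + f i) init =
      init + ∑ i ∈ Finset.range n, f i := by
  induction n with
  | zero => simp
  | succ n ih =>
      rw [List.range_succ, List.foldl_append, List.foldl_cons, List.foldl_nil, ih,
        Finset.sum_range_succ]
      ring

-- a sum over the window [l, h) equals the sum over [0, n) when f vanishes outside the window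
theorem pv_sum_window (f : Nat → Int) (l h n : Nat) (hhn : h ≤ n)
    (hz : ∀ i, i < n → (i < l ∨ h ≤ i) → f i = 0) :
    (∑ t ∈ Finset.range (h - l), f (l + t)) = ∑ i ∈ Finset.range n, f i := by
  rw [← Finset.sum_Ico_eq_sum_range]
  have hIco : Finset.Ico l h = (Finset.range n).filter (fun i => l ≤ i ∧ i < h) := by
    ext i
    simp only [Finset.mem_Ico, Finset.mem_filter, Finset.mem_range]
    omega
  rw [hIco, Finset.sum_filter]
  refine Finset.sum_congr rfl (fun i hi => ?_)
  rw [Finset.mem_range] at hi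
  split_ifs with h1
  · rfl
  · exact (hz i hi (by omega)).symm

theorem pvConvCoeff_eq (p q : List Int) (k : Nat) :
    pvConvCoeff p q k = (pvP p * pvP q).coeff k := by
  have hlo : (0 : Int) ≤ max 0 ((k : Int) - q.length + 1) := le_max_left 0 _
  have hhi : (0 : Int) ≤ min (k : Int) ((p.length : Int) - 1) + 1 := by omega
  rw [pvConvCoeff, PySem.List.pyRange_one, List.foldl_map, pv_foldl_add, zero_add,
    pv_coeff_mul]
  simp only [pvP_coeff]
  have hterm : ∀ t : Nat,
      p.getD ((max 0 ((k : Int) - q.length + 1)) + (t : Int)).toNat 0 *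
        q.getD (k - ((max 0 ((k : Int) - q.length + 1)) + (t : Int)).toNat) 0 =
      p.getD ((max 0 ((k : Int) - q.length + 1)).toNat + t) 0 *
        q.getD (k - ((max 0 ((k : Int) - q.length + 1)).toNat + t)) 0 := by
    intro t
    congr 2 <;> omega
  rw [Finset.sum_congr rfl (fun t _ => hterm t),
    show ((min (k : Int) ((p.length : Int) - 1) + 1) - max 0 ((k : Int) - q.length + 1)).toNat =
      (min (k : Int) ((p.length : Int) - 1) + 1).toNat -
        (max 0 ((k : Int) - q.length + 1)).toNat from by omega]
  apply pv_sum_window (fun i => p.getD i 0 * q.getD (k - i) 0)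
    ((max 0 ((k : Int) - q.length + 1)).toNat)
    ((min (k : Int) ((p.length : Int) - 1) + 1).toNat) (k + 1) (by omega)
  intro i hi hout
  rcases hout with h1 | h1
  · rw [List.getD_eq_default q _ (by omega), mul_zero]
  · rw [List.getD_eq_default p _ (by omega), zero_mul]

theorem pvConv_eq_mul (p q : List Int) (deg : Int) :
    pvConv p q deg = series_mul p q deg := by
  rw [pvConv, series_mul_char]
  exact List.map_congr_left (fun k _ => pvConvCoeff_eq p q k)

-- iterated multiplication by a fixed base
def pvItm (deg : Int) (base : List Int) (out : List Int) : Nat → List Int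
  | 0 => out
  | n + 1 => series_mul (pvItm deg base out n) base deg

theorem pv_mul_getD (a b : List Int) (deg : Int) (k : Nat) (hk : k < (deg + 1).toNat) :
    (series_mul a b deg).getD k 0 = (pvP a * pvP b).coeff k := by
  rw [series_mul_char, List.getD_eq_getElem _ 0 (by simpa using hk),
    List.getElem_map, List.getElem_range]

theorem series_mul_assoc (a b c : List Int) (deg : Int) :
    series_mul (series_mul a b deg) c deg = series_mul a (series_mul b c deg) deg := by
  rw [series_mul_char (series_mul a b deg) c deg, series_mul_char a (series_mul b c deg) deg]
  apply List.map_congr_left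
  intro k hk
  rw [List.mem_range] at hk
  have e1 : (pvP (series_mul a b deg) * pvP c).coeff k = (pvP a * pvP b * pvP c).coeff k := by
    rw [pv_coeff_mul, pv_coeff_mul]
    refine Finset.sum_congr rfl (fun i hi => ?_)
    rw [Finset.mem_range] at hi
    rw [pvP_coeff (series_mul a b deg) i, pv_mul_getD a b deg i (by omega)]
  have e2 : (pvP a * pvP (series_mul b c deg)).coeff k = (pvP a * (pvP b * pvP c)).coeff k := by
    rw [pv_coeff_mul, pv_coeff_mul]
    refine Finset.sum_congr rfl (fun i hi => ?_)
    rw [Finset.mem_range] at hi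
    rw [pvP_coeff (series_mul b c deg) (k - i), pv_mul_getD b c deg (k - i) (by omega)]
  rw [e1, e2, mul_assoc]

theorem pvItm_shift (deg : Int) (base out : List Int) (n : Nat) :
    pvItm deg base (series_mul out base deg) n = pvItm deg base out (n + 1) := by
  induction n with
  | zero => rfl
  | succ n ih => simp [pvItm, ih]

theorem pvItm_sq (deg : Int) (base out : List Int) (n : Nat) :
    pvItm deg (series_mul base base deg) out n = pvItm deg base out (2 * n) := by
  induction n with
  | zero => rfl
  | succ n ih =>
      have : 2 * (n + 1) = (2 * n + 1) + 1 := by omega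
      rw [this]
      simp only [pvItm, ih, series_mul_assoc]

theorem pvPowLoop_eq_itm (deg : Int) (e : Nat) (out base : List Int) :
    pvPowLoop deg e out base = pvItm deg base out e := by
  induction e using Nat.strong_induction_on generalizing out base with
  | _ e ih =>
    rw [pvPowLoop]
    split_ifs with h hodd hdiv hdiv2
    · subst h; rfl
    · rw [ih (e / 2) (Nat.div_lt_self (Nat.pos_of_ne_zero h) one_lt_two),
        pvItm_sq, pvItm_shift, show 2 * (e / 2) + 1 = e from by omega]
    · have he : e = 1 := by omega
      subst he
      rw [ih 0 (by omega)]
      rfl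
    · rw [ih (e / 2) (Nat.div_lt_self (Nat.pos_of_ne_zero h) one_lt_two),
        pvItm_sq, show 2 * (e / 2) = e from by omega]
    · exfalso; omega

theorem series_pow_alt_eq_itm (a : List Int) (exp : Int) (deg : Int) (hdeg : 0 ≤ deg) :
    series_pow_alt a exp deg =
      pvItm deg a ((List.replicate (deg + 1).toNat 0).set 0 1) exp.toNat := by
  have hstart : (1 :: List.replicate deg.toNat (0 : Int)) =
      (List.replicate (deg + 1).toNat 0).set 0 1 := by
    rw [show (deg + 1).toNat = deg.toNat + 1 from by omega, List.replicate_succ]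
    rfl
  unfold series_pow_alt
  rw [hstart]
  induction exp.toNat with
  | zero => rfl
  | succ n ih =>
      rw [List.range_succ, List.foldl_append, List.foldl_cons, List.foldl_nil, ih]
      simp only [pvItm, pvConv_eq_mul]

-- ===== VERDICT (by name: the statement is the Claim_ definition above) =====
theorem series_pow_spec : Claim_equal_series_pow := by
  intro a exp deg _ hpre
  unfold Spec_series_pow
  rw [series_pow_alt_eq_itm a exp deg hpre.2, series_pow, pvPowLoop_eq_itm]
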